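-- pv_equiv track=rewrite | github.com/fatima-sidd/steganography | Code/text_steganography.py | decrypt_pixel
-- ===== SOURCE A (Python) =====
-- def decrypt_pixel(pix):
--     st = ''
--     c = 0
--     for i in pix:
--         c += 1
--         if i % 2 != 0 and c % 9 == 0:
--             break
--         elif i % 2 == 0 and c % 9 == 0:
--             st += ' '
--         elif i % 2 == 0:
--             st += '0'
--         elif i % 2 != 0:
--             st += '1'
--     return st
-- ===== SOURCE B (Python) =====
-- def decrypt_pixel(pix):
--     out = []
--     for k in range(0, len(pix), 9):
--         chunk = pix[k:k+9]
--         for i in chunk[:8]: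
--             out.append('0' if i % 2 == 0 else '1')
--         if len(chunk) == 9:
--             if chunk[8] % 2 != 0:
--                 return ''.join(out)
--             out.append(' ')
--     return ''.join(out)
-- ===== Notes on version B (the rewrite author's own statement) =====
-- stated objective: alternative
-- what changed: Replaces the flat loop with a running modular counter by explicit 9-element block processing: each block emits 8 parity bits, then its 9th element either terminates decoding (odd) or emits a space (even); output is accumulated in a list joined once.
import Mathlib
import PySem

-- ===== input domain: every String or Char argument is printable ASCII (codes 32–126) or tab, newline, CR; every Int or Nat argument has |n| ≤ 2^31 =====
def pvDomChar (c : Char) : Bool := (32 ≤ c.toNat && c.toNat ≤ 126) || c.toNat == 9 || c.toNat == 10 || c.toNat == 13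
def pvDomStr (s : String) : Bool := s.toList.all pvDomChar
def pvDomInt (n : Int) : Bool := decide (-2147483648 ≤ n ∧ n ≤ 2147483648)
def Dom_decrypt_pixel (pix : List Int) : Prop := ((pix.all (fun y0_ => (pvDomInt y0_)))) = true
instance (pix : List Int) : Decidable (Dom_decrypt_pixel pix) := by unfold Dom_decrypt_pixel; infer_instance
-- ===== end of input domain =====

-- B reorganises A's flat loop with a running modular counter into explicit 9-element block
-- processing (8 parity bits, then the separator element); same output, 'alternative' objective.

-- ===== PORT A =====
-- A's for-loop with counter c and break, as structural recursion; st kept as List Char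
-- (String.ofList at the end), appends mirror A's `st += '…'`.
def decrypt_pixel_goA (l : List Int) (st : List Char) (c : Int) : List Char :=
  match l with
  | [] => st
  | i :: rest =>
    let c := c + 1
    if PySem.Int.mod i 2 ≠ 0 ∧ PySem.Int.mod c 9 = 0 then st
    else if PySem.Int.mod i 2 = 0 ∧ PySem.Int.mod c 9 = 0 then decrypt_pixel_goA rest (st ++ [' ']) c
    else if PySem.Int.mod i 2 = 0 then decrypt_pixel_goA rest (st ++ ['0']) c
    else decrypt_pixel_goA rest (st ++ ['1']) c

def decrypt_pixel (pix : List Int) : String := String.ofList (decrypt_pixel_goA pix [] 0)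

-- ===== PORT B =====
-- bits of the first (up to) 8 elements of a chunk
def decrypt_pixel_bits (chunk8 : List Int) : List Char :=
  chunk8.map (fun i => if PySem.Int.mod i 2 = 0 then '0' else '1')

-- B's outer loop over 9-element chunks; early return on an odd separator.
def decrypt_pixel_goB (pix : List Int) (out : List Char) : List Char :=
  if pix.isEmpty then out
  else
    let chunk := pix.take 9
    let out := out ++ decrypt_pixel_bits (chunk.take 8)
    if h9c : chunk.length = 9 then
      if PySem.Int.mod (chunk.getD 8 0) 2 ≠ 0 then out
      else decrypt_pixel_goB (pix.drop 9) (out ++ [' '])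
    else out
  termination_by pix.length
  decreasing_by
    have h9 : (List.take 9 pix).length = 9 := h9c
    simp only [List.length_take] at h9
    simp only [List.length_drop]
    omega

def decrypt_pixel_alt (pix : List Int) : String := String.ofList (decrypt_pixel_goB pix [])

-- ===== PRECONDITION & SPEC =====
def Spec_decrypt_pixel (pix : List Int) (out : String) : Prop := out = decrypt_pixel_alt pix
instance (pix : List Int) (out : String) : Decidable (Spec_decrypt_pixel pix out) := by unfold Spec_decrypt_pixel; infer_instance

-- ===== CLAIM (what is proved, stated in full; the proofs are below) =====
def Claim_equal_decrypt_pixel : Prop := ∀ (pix : List Int), Dom_decrypt_pixel pix → Spec_decrypt_pixel pix (decrypt_pixel pix)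

-- ===== LEMMAS AND PROOFS =====

-- Running A over a chunk that stays strictly inside a 9-block just emits its parity bits.
theorem dp_run (chunk : List Int) : ∀ (ys : List Int) (st : List Char) (c : Int),
    c % 9 + (chunk.length : Int) ≤ 8 →
    decrypt_pixel_goA (chunk ++ ys) st c
      = decrypt_pixel_goA ys (st ++ decrypt_pixel_bits chunk) (c + chunk.length) := by
  induction chunk with
  | nil => intro ys st c _; simp [decrypt_pixel_bits]
  | cons i rest ih =>
    intro ys st c hle
    simp only [List.length_cons] at hle
    have hc : 0 ≤ c % 9 ∧ c % 9 < 9 := ⟨Int.emod_nonneg c (by norm_num), Int.emod_lt_of_pos c (by norm_num)⟩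
    have hlen : (0:Int) ≤ (rest.length : Int) := by positivity
    have hne : ¬ ((9:Int) ∣ (c + 1)) := by omega
    by_cases hi : (2:Int) ∣ i
    · simp only [List.cons_append, decrypt_pixel_goA, PySem.Int.mod_eq_zero_iff_dvd, hi, hne,
        ne_eq, not_true_eq_false, and_false, if_false, if_true]
      rw [ih ys (st ++ ['0']) (c + 1) (by omega)]
      simp only [decrypt_pixel_bits, PySem.Int.mod_eq_zero_iff_dvd, List.map_cons, hi, if_true]
      have : c + 1 + (rest.length : Int) = c + ((rest.length : Int) + 1) := by ring
      rw [this]; simp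
    · simp only [List.cons_append, decrypt_pixel_goA, PySem.Int.mod_eq_zero_iff_dvd, hi, hne,
        ne_eq, not_false_eq_true, and_false, if_false]
      rw [ih ys (st ++ ['1']) (c + 1) (by omega)]
      simp only [decrypt_pixel_bits, PySem.Int.mod_eq_zero_iff_dvd, List.map_cons, if_neg hi]
      have : c + 1 + (rest.length : Int) = c + ((rest.length : Int) + 1) := by ring
      rw [this]; simp

theorem dp_main : ∀ (n : Nat) (pix : List Int) (st : List Char) (c : Int),
    pix.length ≤ n → c % 9 = 0 →
    decrypt_pixel_goA pix st c = decrypt_pixel_goB pix st := by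
  intro n
  induction n with
  | zero =>
    intro pix st c hn _
    have : pix = [] := List.eq_nil_of_length_eq_zero (Nat.le_zero.mp hn)
    subst this; rw [decrypt_pixel_goA.eq_def, decrypt_pixel_goB.eq_def]; rfl
  | succ n ih =>
    intro pix st c hn hc
    match pix with
    | [] => rw [decrypt_pixel_goA.eq_def, decrypt_pixel_goB.eq_def]; rfl
    | p :: ps =>
      by_cases h8 : (p :: ps).length ≤ 8
      · -- short final chunk: both sides emit just the parity bits
        have hA := dp_run (p :: ps) [] st c (by rw [hc]; omega)
        rw [List.append_nil] at hA
        rw [hA, decrypt_pixel_goA]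
        rw [decrypt_pixel_goB.eq_def]
        simp only [List.isEmpty_cons, Bool.false_eq_true, not_false_eq_true, if_neg]
        rw [List.take_of_length_le (by omega : (p :: ps).length ≤ 9)]
        rw [dif_neg (by omega : ¬ (p :: ps).length = 9)]
        rw [List.take_of_length_le h8]
      · -- full chunk: 8 bits, then the separator element decides
        rw [not_le] at h8
        simp only [List.length_cons] at h8 hn
        have hsplit : (p :: ps) = (p :: ps).take 8 ++ (p :: ps).drop 8 :=
          (List.take_append_drop 8 _).symm
        have h8lt : 8 < (p :: ps).length := by simp only [List.length_cons]; omega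
        have hdrop : (p :: ps).drop 8 = (p :: ps).getD 8 0 :: (p :: ps).drop 9 := by
          rw [List.drop_eq_getElem_cons h8lt, List.getD_eq_getElem _ _ h8lt]
        have htk8 : ((p :: ps).take 8).length = 8 := by
          simp only [List.length_take, List.length_cons]; omega
        conv_lhs => rw [hsplit]
        rw [dp_run ((p :: ps).take 8) _ st c (by rw [hc, htk8]; norm_num)]
        rw [hdrop, decrypt_pixel_goA, htk8]
        have hdvd9 : (9:Int) ∣ (c + (8:Nat) + 1) := by omega
        rw [decrypt_pixel_goB.eq_def]
        simp only [List.isEmpty_cons, Bool.false_eq_true, not_false_eq_true, if_neg]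
        have htk9 : ((p :: ps).take 9).length = 9 := by
          simp only [List.length_take, List.length_cons]; omega
        rw [dif_pos htk9]
        have hg : ((p :: ps).take 9).getD 8 0 = (p :: ps).getD 8 0 := by
          simp [List.getD]
        have htt : ((p :: ps).take 9).take 8 = (p :: ps).take 8 := by
          rw [List.take_take]; norm_num
        rw [hg, htt]
        simp only [PySem.Int.mod_eq_zero_iff_dvd, ne_eq]
        by_cases hp : (2:Int) ∣ (p :: ps).getD 8 0
        · -- even separator: a space, then recurse on the rest
          rw [if_neg (fun h => h.1 hp), if_pos ⟨hp, hdvd9⟩, if_neg (not_not_intro hp)]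
          exact ih ((p :: ps).drop 9) _ (c + (8:Nat) + 1)
            (by simp only [List.length_drop, List.length_cons]; omega)
            (by push_cast; omega)
        · -- odd separator: both stop after the 8 bits
          rw [if_pos ⟨hp, hdvd9⟩, if_pos hp]

-- ===== VERDICT (by name: the statement is the Claim_ definition above) =====
theorem decrypt_pixel_spec : Claim_equal_decrypt_pixel := by
  intro pix _
  unfold Spec_decrypt_pixel decrypt_pixel decrypt_pixel_alt
  rw [dp_main pix.length pix [] 0 le_rfl (by norm_num)]
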